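-- pv_equiv track=rewrite | github.com/PratikshaJain37/cypher-decypher | helpers/multiplicative.py | valid_key_multiplicative
-- ===== SOURCE A (Python) =====
-- def valid_key_multiplicative(key):
--
--     key_inverse_exist = 0
--     for key_inverse in [1,3,5,7,9,11,15,17,19,21,23,25]:
--         if (key*key_inverse)%26==1:
--             key_inverse_exist += 1
--
--     if key_inverse_exist>0:
--         return True
--     else:
--         return False
-- ===== SOURCE B (Python) =====
-- UNITS_MOD_26 = frozenset({1, 3, 5, 7, 9, 11, 15, 17, 19, 21, 23, 25})
--
-- def valid_key_multiplicative(key):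
--     return (key % 26) in UNITS_MOD_26
-- ===== Notes on version B (the rewrite author's own statement) =====
-- stated objective: simpler
-- what changed: Replaces A's loop that multiplies key by every odd candidate and counts hits with a single residue reduction and one membership test in the precomputed set of units modulo the alphabet size.
import Mathlib
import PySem

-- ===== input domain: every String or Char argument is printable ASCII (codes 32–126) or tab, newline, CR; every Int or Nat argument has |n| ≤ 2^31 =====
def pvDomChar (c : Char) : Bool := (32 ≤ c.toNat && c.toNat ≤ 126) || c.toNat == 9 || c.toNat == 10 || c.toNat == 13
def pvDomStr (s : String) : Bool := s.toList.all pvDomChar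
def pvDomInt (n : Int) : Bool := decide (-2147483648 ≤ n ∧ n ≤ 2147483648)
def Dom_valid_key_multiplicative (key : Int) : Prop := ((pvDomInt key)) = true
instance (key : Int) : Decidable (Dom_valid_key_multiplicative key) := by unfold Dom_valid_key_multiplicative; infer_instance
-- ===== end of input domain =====

-- B replaces the 12-iteration inverse-search loop by one residue reduction and a set membership test (objective: simpler).
-- ===== PORT A =====
def valid_key_multiplicative (key : Int) : Bool :=
  let key_inverse_exist : Int :=
    ([1, 3, 5, 7, 9, 11, 15, 17, 19, 21, 23, 25] : List Int).foldl
      (fun acc key_inverse =>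
        if PySem.Int.mod (key * key_inverse) 26 = 1 then acc + 1 else acc) 0
  if key_inverse_exist > 0 then true else false

-- ===== PORT B =====
-- B reduces key mod 26 once and tests membership in the precomputed set of units mod 26
def unitsMod26 : PySem.Set Int :=
  PySem.Set.ofList [1, 3, 5, 7, 9, 11, 15, 17, 19, 21, 23, 25]

def valid_key_multiplicative_alt (key : Int) : Bool :=
  unitsMod26.contains (PySem.Int.mod key 26)

-- ===== PRECONDITION & SPEC =====
def Spec_valid_key_multiplicative (key : Int) (out : Bool) : Prop := out = valid_key_multiplicative_alt key
instance (key : Int) (out : Bool) : Decidable (Spec_valid_key_multiplicative key out) := by unfold Spec_valid_key_multiplicative; infer_instance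

-- ===== CLAIM (what is proved, stated in full; the proofs are below) =====
def Claim_equal_valid_key_multiplicative : Prop := ∀ (key : Int), Dom_valid_key_multiplicative key → Spec_valid_key_multiplicative key (valid_key_multiplicative key)

-- ===== LEMMAS AND PROOFS =====

-- ===== VERDICT (by name: the statement is the Claim_ definition above) =====
-- A's loop condition only depends on key % 26: rewrite key*k % 26 to (key%26)*k % 26
theorem modkey_eq (key k : Int) :
    PySem.Int.mod (key * k) 26 = key % 26 * k % 26 := by
  rw [PySem.Int.mod_eq_emod_of_pos (by norm_num)]
  rw [Int.mul_emod key k, Int.mul_emod (key % 26) k,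
    Int.emod_emod_of_dvd _ (dvd_refl (26:Int))]

theorem both_eq_on_residue (key : Int) :
    valid_key_multiplicative key = valid_key_multiplicative_alt key := by
  have hA : valid_key_multiplicative key = valid_key_multiplicative (key % 26) := by
    simp only [valid_key_multiplicative, modkey_eq,
      Int.emod_emod_of_dvd _ (dvd_refl (26:Int))]
  have hB : valid_key_multiplicative_alt key = valid_key_multiplicative_alt (key % 26) := by
    simp only [valid_key_multiplicative_alt,
      PySem.Int.mod_eq_emod_of_pos (by norm_num : (0:Int) < 26),
      Int.emod_emod_of_dvd _ (by norm_num : (26:Int) ∣ 26)]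
  rw [hA, hB]
  have h0 : 0 ≤ key % 26 := Int.emod_nonneg key (by norm_num)
  have h26 : key % 26 < 26 := Int.emod_lt_of_pos key (by norm_num)
  interval_cases (key % 26) <;> decide

theorem valid_key_multiplicative_spec : Claim_equal_valid_key_multiplicative := by
  intro key _
  exact both_eq_on_residue key
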